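-- pv_equiv track=rewrite | github.com/YunHsieh/leetcode | 2389.LongestSubsequenceWithLimitedSum/LongestSubsequenceWithLimitedSum.py | answerQueries
-- ===== SOURCE A (Python) =====
-- def answerQueries(nums: list[int], queries: list[int]) -> list[int]:
--     nums = sorted(nums)
--     results = [0 for _ in range(len(queries))]
--     for num in nums:
--         for i, _ in enumerate(queries):
--             if num <= queries[i]:
--                 queries[i] -= num
--                 results[i] += 1
--     return results
-- ===== SOURCE B (Python) =====
-- def answerQueries(nums: list[int], queries: list[int]) -> list[int]:
--     # Running max of prefix sums of sorted nums (monotone even with negatives),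
--     # then binary search per query.  Does NOT mutate `queries` (A does).
--     prefmax = []
--     s = 0
--     m = 0
--     for num in sorted(nums):
--         s += num
--         m = s if not prefmax else max(m, s)
--         prefmax.append(m)
--     out = []
--     for q in queries:
--         lo, hi = 0, len(prefmax)
--         while lo < hi:
--             mid = (lo + hi) // 2
--             if prefmax[mid] <= q:
--                 lo = mid + 1
--             else:
--                 hi = mid
--         out.append(lo)
--     return out
-- ===== Notes on version B (the rewrite author's own statement) =====
-- stated objective: faster
-- what changed: A's nested loop that re-scans and mutates every query for each sorted element is replaced by one pass building the running maxima of prefix sums of sorted(nums) (monotone even with negative numbers) followed by a binary search per query; B does not mutate the queries argument.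
import Mathlib
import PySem

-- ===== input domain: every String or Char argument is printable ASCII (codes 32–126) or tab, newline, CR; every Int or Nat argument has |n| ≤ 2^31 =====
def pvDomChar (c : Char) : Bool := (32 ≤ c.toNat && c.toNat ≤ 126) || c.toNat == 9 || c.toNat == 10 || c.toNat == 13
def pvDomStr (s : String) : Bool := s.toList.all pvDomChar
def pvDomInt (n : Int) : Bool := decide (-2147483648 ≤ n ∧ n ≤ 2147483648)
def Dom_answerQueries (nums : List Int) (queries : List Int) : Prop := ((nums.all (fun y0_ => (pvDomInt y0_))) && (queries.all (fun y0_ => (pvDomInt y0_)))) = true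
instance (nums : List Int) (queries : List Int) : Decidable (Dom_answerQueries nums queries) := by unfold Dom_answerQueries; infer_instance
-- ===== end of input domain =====

-- B replaces A's O(n·m) mutate-each-query greedy by running maxima of prefix sums of
-- sorted nums plus a per-query binary search (O((n+m)·log n)); return values agree —
-- note A mutates its `queries` argument in place, B does not (equivalence is about the
-- RETURN value only).

-- ===== PORT A =====
-- one pass of the inner `for i, _ in enumerate(queries)` body for a fixed num
def pvAStep (num : Int) (st : List Int × List Int) (i : Nat) : List Int × List Int :=
  let q := st.1.getD i 0            -- queries[i]; i < length always, so getD is exact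
  if num ≤ q then (st.1.set i (q - num), st.2.set i (st.2.getD i 0 + 1)) else st

def answerQueries (nums : List Int) (queries : List Int) : List Int :=
  let nums' := PySem.List.sorted nums (fun x => x) false
  let results : List Int := (List.range queries.length).map (fun _ => 0)
  -- `enumerate(queries)`: the list is mutated in place but its length never changes,
  -- so the index sequence is range of the current state's length
  (nums'.foldl (fun st num => (List.range st.1.length).foldl (pvAStep num) st)
      (queries, results)).2

-- ===== PORT B =====
-- the `while lo < hi` binary-search loop of Source B; `fuel` only bounds the iteration
-- count (each step halves hi - lo, so any fuel ≥ hi - lo gives the loop's exit state)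
def pvBSearch (pref : List Int) (q : Int) : Nat → Nat → Nat → Nat
  | 0, lo, _ => lo
  | fuel + 1, lo, hi =>
    if lo < hi then
      let mid := (lo + hi) / 2
      if pref.getD mid 0 ≤ q then    -- pref[mid]; mid < hi ≤ length, so getD is exact
        pvBSearch pref q fuel (mid + 1) hi
      else
        pvBSearch pref q fuel lo mid
    else lo

-- the first loop of Source B: running max `m` of prefix sums `s` of sorted nums
def pvPrefMax (nums : List Int) : List Int :=
  ((PySem.List.sorted nums (fun x => x) false).foldl
    (fun (acc : List Int × Int × Int) num =>
      let s := acc.2.1 + num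
      let m := if acc.1.isEmpty then s else max acc.2.2 s
      (acc.1 ++ [m], s, m)) ([], 0, 0)).1

def answerQueries_alt (nums : List Int) (queries : List Int) : List Int :=
  let prefmax := pvPrefMax nums
  queries.foldl (fun out q => out ++ [(pvBSearch prefmax q prefmax.length 0 prefmax.length : Int)]) []

-- ===== PRECONDITION & SPEC =====
def Spec_answerQueries (nums : List Int) (queries : List Int) (out : List Int) : Prop := out = answerQueries_alt nums queries
instance (nums : List Int) (queries : List Int) (out : List Int) : Decidable (Spec_answerQueries nums queries out) := by unfold Spec_answerQueries; infer_instance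

-- ===== CLAIM (what is proved, stated in full; the proofs are below) =====
def Claim_equal_answerQueries : Prop := ∀ (nums : List Int) (queries : List Int), Dom_answerQueries nums queries → Spec_answerQueries nums queries (answerQueries nums queries)

-- ===== LEMMAS AND PROOFS =====

-- per-query greedy step: state (remaining budget, count)
def gstep (p : Int × Int) (num : Int) : Int × Int :=
  if num ≤ p.1 then (p.1 - num, p.2 + 1) else p

-- spec of Source B's first loop after the first element: running max of prefix sums
def pm (s m : Int) : List Int → List Int
  | [] => []
  | n :: t => (max m (s + n)) :: pm (s + n) (max m (s + n)) t

def pmTop : List Int → List Int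
  | [] => []
  | n :: t => n :: pm n n t

-- length of the longest prefix of elements ≤ q
def ctL : List Int → Int → Nat
  | [], _ => 0
  | x :: xs, q => if x ≤ q then ctL xs q + 1 else 0

-- ---- A-side restructuring ----

theorem pvAStep_succ (num q r : Int) (qs rs : List Int) (i : Nat) :
    pvAStep num (q :: qs, r :: rs) (i + 1)
      = (q :: (pvAStep num (qs, rs) i).1, r :: (pvAStep num (qs, rs) i).2) := by
  simp only [pvAStep, List.getD_cons_succ, List.set_cons_succ]
  split <;> simp

theorem foldl_pvAStep_shift (num q r : Int) :
    ∀ (l : List Nat) (qs rs : List Int),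
      l.foldl (fun st i => pvAStep num st (i + 1)) (q :: qs, r :: rs)
        = (q :: (l.foldl (pvAStep num) (qs, rs)).1,
           r :: (l.foldl (pvAStep num) (qs, rs)).2) := by
  intro l
  induction l with
  | nil => intro qs rs; simp
  | cons i t ih =>
    intro qs rs
    simp only [List.foldl_cons, pvAStep_succ]
    exact ih _ _

theorem inner_fold (num : Int) :
    ∀ (qs rs : List Int), rs.length = qs.length →
      (List.range qs.length).foldl (pvAStep num) (qs, rs)
        = (qs.map (fun q => if num ≤ q then q - num else q),
           List.zipWith (fun q r => if num ≤ q then r + 1 else r) qs rs) := by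
  intro qs
  induction qs with
  | nil => intro rs h; simp at h; simp [h]
  | cons q qs' ih =>
    intro rs h
    cases rs with
    | nil => simp at h
    | cons r rs' =>
      simp only [List.length_cons] at h
      have hstep : pvAStep num (q :: qs', r :: rs') 0
          = ((if num ≤ q then q - num else q) :: qs',
             (if num ≤ q then r + 1 else r) :: rs') := by
        simp only [pvAStep, List.getD_cons_zero, List.set_cons_zero]
        split <;> simp
      simp only [List.length_cons]
      rw [List.range_succ_eq_map]
      simp only [List.foldl_cons, hstep, List.foldl_map, foldl_pvAStep_shift]
      rw [ih rs' (by omega)]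
      simp

theorem zipWith_map_same {α β : Type} (f : α → β) (g : α → β) (h : β → β → β) :
    ∀ (l : List α), List.zipWith h (l.map f) (l.map g) = l.map (fun x => h (f x) (g x)) := by
  intro l; induction l with
  | nil => simp
  | cons a t ih => simp [ih]

theorem outer_fold :
    ∀ (ns : List Int) (ps : List (Int × Int)),
      ns.foldl (fun st num => (List.range st.1.length).foldl (pvAStep num) st)
          (ps.map Prod.fst, ps.map Prod.snd)
        = (ps.map (fun p => (List.foldl gstep p ns).1),
           ps.map (fun p => (List.foldl gstep p ns).2)) := by
  intro ns
  induction ns with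
  | nil => intro ps; simp
  | cons num ns' ih =>
    intro ps
    simp only [List.foldl_cons]
    have hlen : (ps.map Prod.snd).length = (ps.map Prod.fst).length := by simp
    rw [inner_fold num (ps.map Prod.fst) (ps.map Prod.snd) hlen]
    rw [zipWith_map_same, List.map_map]
    have h1 : ps.map ((fun q => if num ≤ q then q - num else q) ∘ Prod.fst)
        = (ps.map (fun p => gstep p num)).map Prod.fst := by
      simp only [List.map_map]; apply List.map_congr_left; intro p _
      simp only [Function.comp, gstep]; split <;> rfl
    have h2 : ps.map ((fun x => if num ≤ x.1 then x.2 + 1 else x.2))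
        = (ps.map (fun p => gstep p num)).map Prod.snd := by
      simp only [List.map_map]; apply List.map_congr_left; intro p _
      simp only [Function.comp, gstep]; split <;> rfl
    rw [h1, h2, ih (ps.map (fun p => gstep p num))]
    simp [List.map_map, Function.comp]

-- ---- plumbing helpers ----

theorem foldl_append_map {α β : Type} (f : α → β) :
    ∀ (l : List α) (acc : List β),
      l.foldl (fun a x => a ++ [f x]) acc = acc ++ l.map f := by
  intro l; induction l with
  | nil => intro acc; simp
  | cons a t ih => intro acc; simp [ih]

-- A's result, per query: the greedy count over the sorted list
theorem A_eq_map (nums queries : List Int) :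
    answerQueries nums queries
      = queries.map (fun q => (List.foldl gstep (q, 0) (PySem.List.sorted nums (fun x => x) false)).2) := by
  unfold answerQueries
  have h := outer_fold (PySem.List.sorted nums (fun x => x) false) (queries.map (fun q => (q, (0 : Int))))
  simp only [List.map_map, Function.comp_def] at h
  have hfst : queries.map (fun q => (q, (0 : Int)).1) = queries := by simp
  have hsnd : queries.map (fun q => ((q, (0 : Int)).2)) = (List.range queries.length).map (fun _ => (0 : Int)) := by
    simp [List.map_const']
  rw [hfst, hsnd] at h
  exact congrArg Prod.snd h

-- B's result, per query: binary search on the prefix-max list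
theorem B_eq_map (nums queries : List Int) :
    answerQueries_alt nums queries
      = queries.map (fun q => ((pvBSearch (pvPrefMax nums) q (pvPrefMax nums).length 0 (pvPrefMax nums).length : Nat) : Int)) := by
  unfold answerQueries_alt
  rw [foldl_append_map]
  simp

-- ---- characterisation of pvPrefMax ----

theorem prefmax_fold (l : List Int) :
    ∀ (p : List Int) (s m : Int), p ≠ [] →
      (l.foldl (fun (acc : List Int × Int × Int) num =>
        let s := acc.2.1 + num
        let m := if acc.1.isEmpty then s else max acc.2.2 s
        (acc.1 ++ [m], s, m)) (p, s, m)).1 = p ++ pm s m l := by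
  induction l with
  | nil => intro p s m _; simp [pm]
  | cons n t ih =>
    intro p s m hp
    have hne : p.isEmpty = false := by simpa [List.isEmpty_iff] using hp
    simp only [List.foldl_cons, hne, Bool.false_eq_true, if_false]
    rw [ih (p ++ [max m (s + n)]) (s + n) (max m (s + n)) (by simp)]
    simp [pm]

theorem prefmax_char (nums : List Int) :
    pvPrefMax nums = pmTop (PySem.List.sorted nums (fun x => x) false) := by
  unfold pvPrefMax
  cases h : PySem.List.sorted nums (fun x => x) false with
  | nil => simp [pmTop]
  | cons n t =>
    simp only [List.foldl_cons, List.isEmpty_nil, if_true, List.nil_append, zero_add]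
    rw [prefmax_fold t [n] n n (by simp)]
    simp [pmTop]

theorem pm_ge (q0 : Int) : ∀ (t : List Int) (s m : Int), q0 ≤ m → ∀ x ∈ pm s m t, q0 ≤ x := by
  intro t
  induction t with
  | nil => intro s m _ x hx; simp [pm] at hx
  | cons n t' ih =>
    intro s m hm x hx
    simp only [pm, List.mem_cons] at hx
    rcases hx with h | h
    · subst h; exact le_trans hm (le_max_left _ _)
    · exact ih (s + n) (max m (s + n)) (le_trans hm (le_max_left _ _)) x h

theorem pm_pairwise : ∀ (t : List Int) (s m : Int), (pm s m t).Pairwise (· ≤ ·) := by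
  intro t
  induction t with
  | nil => intro s m; simp [pm]
  | cons n t' ih =>
    intro s m
    simp only [pm, List.pairwise_cons]
    exact ⟨pm_ge _ _ _ _ le_rfl, ih _ _⟩

theorem pmTop_pairwise (l : List Int) : (pmTop l).Pairwise (· ≤ ·) := by
  cases l with
  | nil => simp [pmTop]
  | cons n t =>
    simp only [pmTop, List.pairwise_cons]
    exact ⟨pm_ge _ _ _ _ le_rfl, pm_pairwise _ _ _⟩

-- ---- ctL facts ----

theorem ctL_le_length (q : Int) : ∀ (l : List Int), ctL l q ≤ l.length := by
  intro l; induction l with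
  | nil => simp [ctL]
  | cons x xs ih => simp only [ctL, List.length_cons]; split <;> omega

theorem ctL_lt_le (q : Int) : ∀ (l : List Int) (i : Nat), i < ctL l q → l.getD i 0 ≤ q := by
  intro l
  induction l with
  | nil => intro i h; simp [ctL] at h
  | cons x xs ih =>
    intro i h
    simp only [ctL] at h
    by_cases hx : x ≤ q
    · rw [if_pos hx] at h
      cases i with
      | zero => simpa using hx
      | succ j => simpa using ih j (by omega)
    · rw [if_neg hx] at h; omega

theorem ctL_ge_gt (q : Int) : ∀ (l : List Int), l.Pairwise (· ≤ ·) →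
    ∀ i, ctL l q ≤ i → i < l.length → ¬ l.getD i 0 ≤ q := by
  intro l
  induction l with
  | nil => intro _ i _ h; simp at h
  | cons x xs ih =>
    intro hp i hge hlt
    rw [List.pairwise_cons] at hp
    simp only [ctL] at hge
    by_cases hx : x ≤ q
    · rw [if_pos hx] at hge
      cases i with
      | zero => omega
      | succ j =>
        simpa using ih hp.2 j (by omega) (by simpa using hlt)
    · rw [if_neg hx] at hge
      cases i with
      | zero => simpa using hx
      | succ j =>
        have hj : j < xs.length := by simpa using hlt
        have hmem : xs.getD j 0 ∈ xs := by
          rw [List.getD_eq_getElem _ _ hj]; exact List.getElem_mem hj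
        have : x ≤ xs.getD j 0 := hp.1 _ hmem
        simp only [List.getD_cons_succ]
        omega

-- ---- the binary search computes ctL on a monotone list ----

theorem bsearch_eq (P : List Int) (q : Int) (hP : P.Pairwise (· ≤ ·)) :
    ∀ (k lo hi : Nat), hi - lo ≤ k → lo ≤ ctL P q → ctL P q ≤ hi → hi ≤ P.length →
      pvBSearch P q k lo hi = ctL P q := by
  intro k
  induction k with
  | zero =>
    intro lo hi hk h1 h2 _
    simp only [pvBSearch]
    omega
  | succ k ih =>
    intro lo hi hk h1 h2 h3
    simp only [pvBSearch]
    by_cases hlt : lo < hi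
    · rw [if_pos hlt]
      have hmid1 : lo ≤ (lo + hi) / 2 := by omega
      have hmid2 : (lo + hi) / 2 < hi := by omega
      by_cases hc : P.getD ((lo + hi) / 2) 0 ≤ q
      · rw [if_pos hc]
        have : (lo + hi) / 2 < ctL P q := by
          by_contra hcon
          exact ctL_ge_gt q P hP _ (by omega) (by omega) hc
        exact ih ((lo + hi) / 2 + 1) hi (by omega) (by omega) h2 h3
      · rw [if_neg hc]
        have : ctL P q ≤ (lo + hi) / 2 := by
          by_contra hcon
          exact hc (ctL_lt_le q P _ (by omega))
        exact ih lo ((lo + hi) / 2) (by omega) h1 (by omega) (by omega)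
    · rw [if_neg hlt]; omega

-- ---- the greedy count equals ctL of the prefix-max list ----

theorem no_take (r : Int) : ∀ (ns : List Int) (c : Int), (∀ x ∈ ns, ¬ x ≤ r) →
    ns.foldl gstep (r, c) = (r, c) := by
  intro ns
  induction ns with
  | nil => intro c _; simp
  | cons n t ih =>
    intro c h
    simp only [List.foldl_cons, gstep, if_neg (h n (List.mem_cons_self))]
    exact ih c (fun x hx => h x (List.mem_cons_of_mem _ hx))

theorem greedy_pm (q : Int) : ∀ (t : List Int), t.Pairwise (· ≤ ·) →
    ∀ (s m : Int) (c : Int), m ≤ q →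
      (t.foldl gstep (q - s, c)).2 = c + (ctL (pm s m t) q : Int) := by
  intro t
  induction t with
  | nil => intro _ s m c _; simp [pm, ctL]
  | cons n t' ih =>
    intro hp s m c hm
    rw [List.pairwise_cons] at hp
    simp only [List.foldl_cons, gstep, pm]
    by_cases hc : n ≤ q - s
    · rw [if_pos hc]
      have hmax : max m (s + n) ≤ q := by omega
      have : q - s - n = q - (s + n) := by ring
      rw [this, ih hp.2 (s + n) (max m (s + n)) (c + 1) hmax]
      simp only [ctL, if_pos hmax]
      push_cast
      ring
    · rw [if_neg hc]
      have hmax : ¬ max m (s + n) ≤ q := by omega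
      rw [no_take (q - s) t' c (fun x hx => by have := hp.1 x hx; omega)]
      simp only [ctL, if_neg hmax]
      simp

theorem greedy_eq (ns : List Int) (hs : ns.Pairwise (· ≤ ·)) (q : Int) :
    (ns.foldl gstep (q, 0)).2 = (ctL (pmTop ns) q : Int) := by
  cases ns with
  | nil => simp [pmTop, ctL]
  | cons n t =>
    rw [List.pairwise_cons] at hs
    simp only [List.foldl_cons, gstep, pmTop]
    by_cases hc : n ≤ q
    · rw [if_pos hc]
      rw [greedy_pm q t hs.2 n n (0 + 1) hc]
      simp only [ctL, if_pos hc]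
      push_cast; ring
    · rw [if_neg hc]
      rw [no_take q t 0 (fun x hx => by have := hs.1 x hx; omega)]
      simp [ctL, if_neg hc]

-- ===== VERDICT (by name: the statement is the Claim_ definition above) =====
theorem answerQueries_spec : Claim_equal_answerQueries := by
  intro nums queries _
  unfold Spec_answerQueries
  rw [A_eq_map, B_eq_map]
  apply List.map_congr_left
  intro q _
  have hsort : (PySem.List.sorted nums (fun x => x) false).Pairwise (· ≤ ·) := by
    have := PySem.List.sorted_pairwise nums (fun x => x)
    simpa using this
  rw [greedy_eq _ hsort q, prefmax_char]
  congr 1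
  exact (bsearch_eq _ q (pmTop_pairwise _)
    (pmTop (PySem.List.sorted nums (fun x => x) false)).length 0
    (pmTop (PySem.List.sorted nums (fun x => x) false)).length
    (by omega) (Nat.zero_le _) (ctL_le_length _ _) le_rfl).symm
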